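-- pv_equiv track=rewrite | github.com/ahgong-shulshul/Coding-Test-Study | SMUPC/sooking87/d_O.py | get_roomnum
-- ===== SOURCE A (Python) =====
-- def get_roomnum(num):
--     exponents = 0
--     first_num = 0
--     copy_num = num
--     while True:
--         if copy_num - 2 ** exponents > 0:
--             first_num += 1
--             copy_num -= 2 ** exponents
--             exponents += 1
--         else:
--             break
--     first_num += 1
--     last_num = (num - 2 ** exponents) + 1
--     if len(str(last_num)) < 18:
--         roomnum = str(first_num)
--         roomnum += str(last_num).rjust(18, '0')
--     else:
--         roomnum = str(first_num) + str(last_num)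
--     return int(roomnum)
-- ===== SOURCE B (Python) =====
-- def get_roomnum(num):
--     e = 0 if num <= 1 else num.bit_length() - 1
--     first_num = e + 1
--     last_num = num - 2 ** e + 1
--     s = str(last_num)
--     if len(s) < 18:
--         return int(str(first_num) + s.zfill(18))
--     return int(str(first_num) + s)
-- ===== Notes on version B (the rewrite author's own statement) =====
-- stated objective: simpler
-- what changed: The subtract-successive-powers-of-two while-loop that finds the level is replaced by a closed-form computation via int.bit_length(), and the rjust(18,'0') padding by the idiomatic str.zfill(18).
import Mathlib
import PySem

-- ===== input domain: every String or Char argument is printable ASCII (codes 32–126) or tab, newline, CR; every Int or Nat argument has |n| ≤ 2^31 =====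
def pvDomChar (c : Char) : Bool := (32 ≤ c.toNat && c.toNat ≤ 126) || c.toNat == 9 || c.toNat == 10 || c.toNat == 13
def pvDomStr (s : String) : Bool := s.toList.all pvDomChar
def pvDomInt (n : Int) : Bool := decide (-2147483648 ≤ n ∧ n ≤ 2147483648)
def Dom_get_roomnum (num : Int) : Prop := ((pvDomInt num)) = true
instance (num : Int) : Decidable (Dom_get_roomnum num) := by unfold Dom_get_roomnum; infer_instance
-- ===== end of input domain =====

-- B replaces A's subtract-powers-of-two while-loop by a closed-form level via bit_length
-- (and rjust(18,'0') by zfill(18)): simpler, no loop. A = B on all num ≥ 0 (A raises ValueError otherwise).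


-- ===== PORT A =====
-- A's while-loop: state (copy_num, exponents, first_num); terminates since copy_num strictly
-- decreases while the loop condition holds.
def getRoomnumLoop (copy_num : Int) (exponents : Nat) (first_num : Int) : Nat × Int :=
  if copy_num - 2 ^ exponents > 0 then
    getRoomnumLoop (copy_num - 2 ^ exponents) (exponents + 1) (first_num + 1)
  else (exponents, first_num)
termination_by copy_num.toNat
decreasing_by
  have h2 : (0:Int) < 2 ^ exponents := by positivity
  omega

-- hand port of str.rjust(w, '0'): pad on the left with '0' to width w; exact for every string
def pyRjust0 (cs : List Char) (w : Nat) : List Char :=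
  List.replicate (w - cs.length) '0' ++ cs

def get_roomnum (num : Int) : Int :=
  let r := getRoomnumLoop num 0 0
  let exponents := r.1
  let first_num := r.2 + 1
  let last_num := (num - 2 ^ exponents) + 1
  let roomnum : List Char :=
    if (PySem.Int.toChars last_num).length < 18 then
      PySem.Int.toChars first_num ++ pyRjust0 (PySem.Int.toChars last_num) 18
    else
      PySem.Int.toChars first_num ++ PySem.Int.toChars last_num
  (PySem.Int.ofChars? roomnum).getD 0   -- int(roomnum); none = ValueError (num < 0), excluded by Pre_

-- ===== PORT B =====
def get_roomnum_alt (num : Int) : Int :=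
  let e : Nat := if num ≤ 1 then 0 else PySem.Int.bitLength num - 1
  let first_num : Int := (e : Int) + 1
  let last_num : Int := num - 2 ^ e + 1
  let s := PySem.Int.toChars last_num
  if s.length < 18 then
    (PySem.Int.ofChars? (PySem.Int.toChars first_num ++ PySem.Chars.zfill s 18)).getD 0
  else
    (PySem.Int.ofChars? (PySem.Int.toChars first_num ++ s)).getD 0

-- ===== PRECONDITION & SPEC =====
-- Pre_ excludes exactly num < 0, where A raises ValueError (int() of a string with an inner '-').
def Pre_get_roomnum (num : Int) : Prop := 0 ≤ num
instance (num : Int) : Decidable (Pre_get_roomnum num) := by unfold Pre_get_roomnum; infer_instance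
def pvWitness_get_roomnum : Int := (5)

def Spec_get_roomnum (num : Int) (out : Int) : Prop := out = get_roomnum_alt num
instance (num : Int) (out : Int) : Decidable (Spec_get_roomnum num out) := by unfold Spec_get_roomnum; infer_instance

-- ===== CLAIM (what is proved, stated in full; the proofs are below) =====
def Claim_equal_get_roomnum : Prop := ∀ (num : Int), Dom_get_roomnum num → Pre_get_roomnum num → Spec_get_roomnum num (get_roomnum num)

-- ===== LEMMAS AND PROOFS =====

-- loop exit / step equations
theorem loop_exit (copy : Int) (e : Nat) (f : Int) (h : ¬ copy - 2 ^ e > 0) :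
    getRoomnumLoop copy e f = (e, f) := by
  rw [getRoomnumLoop, if_neg h]

theorem loop_step (copy : Int) (e : Nat) (f : Int) (h : copy - 2 ^ e > 0) :
    getRoomnumLoop copy e f = getRoomnumLoop (copy - 2 ^ e) (e + 1) (f + 1) := by
  rw [getRoomnumLoop, if_pos h]

-- for num ≥ 2, bit_length brackets num between consecutive powers of two
theorem bitLength_brackets (num : Int) (h : 2 ≤ num) :
    (2:Int) ^ (PySem.Int.bitLength num - 1) ≤ num ∧
      num < 2 ^ (PySem.Int.bitLength num - 1 + 1) ∧ 1 ≤ PySem.Int.bitLength num := by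
  have hne : num ≠ 0 := by omega
  have habs : (num.natAbs : Int) = num := by omega
  have hup := PySem.Int.lt_two_pow_bitLength num
  have hlo := PySem.Int.two_pow_bitLength_le num hne
  have hbl1 : 1 ≤ PySem.Int.bitLength num := by
    by_contra hc
    have h0 : PySem.Int.bitLength num = 0 := by omega
    rw [h0] at hup
    simp at hup
    omega
  refine ⟨?_, ?_, hbl1⟩
  · calc (2:Int) ^ (PySem.Int.bitLength num - 1)
        = ((2 ^ (PySem.Int.bitLength num - 1) : Nat) : Int) := by push_cast; ring
      _ ≤ (num.natAbs : Int) := by exact_mod_cast hlo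
      _ = num := habs
  · have hbl : PySem.Int.bitLength num - 1 + 1 = PySem.Int.bitLength num := by omega
    calc num = (num.natAbs : Int) := habs.symm
      _ < ((2 ^ PySem.Int.bitLength num : Nat) : Int) := by exact_mod_cast hup
      _ = 2 ^ (PySem.Int.bitLength num - 1 + 1) := by rw [hbl]; push_cast; ring

-- from the invariant state at level e, the loop runs up to level b and stops there
theorem loop_reach (num : Int) (b : Nat) (hb1 : (2:Int) ^ b ≤ num) (hb2 : num < 2 ^ (b + 1)) :
    ∀ d e, e + d = b → getRoomnumLoop (num - 2 ^ e + 1) e (e : Int) = (b, (b : Int)) := by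
  intro d
  induction d with
  | zero =>
    intro e he
    subst he
    simp only [Nat.add_zero] at *
    refine loop_exit _ _ _ ?_
    have : (2:Int) ^ (e + 1) = 2 ^ e + 2 ^ e := by ring
    omega
  | succ d ih =>
    intro e he
    have he2 : (e + 1) + d = b := by omega
    have hle : (2:Int) ^ (e + 1) ≤ 2 ^ b := by
      apply pow_le_pow_right₀ (by norm_num) (by omega)
    have hstep : num - 2 ^ e + 1 - 2 ^ e > 0 := by
      have : (2:Int) ^ (e + 1) = 2 ^ e + 2 ^ e := by ring
      omega
    rw [loop_step _ _ _ hstep]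
    have harg : num - 2 ^ e + 1 - 2 ^ e = num - 2 ^ (e + 1) + 1 := by ring
    have hcast : ((e : Int) + 1) = ((e + 1 : Nat) : Int) := by push_cast; ring
    rw [harg, hcast]
    exact ih (e + 1) he2

-- the loop from A's initial state computes B's closed-form level, twice
theorem loop_closed_form (num : Int) (h : 0 ≤ num) :
    getRoomnumLoop num 0 0 =
      ((if num ≤ 1 then 0 else PySem.Int.bitLength num - 1 : Nat),
       ((if num ≤ 1 then 0 else PySem.Int.bitLength num - 1 : Nat) : Int)) := by
  by_cases h1 : num ≤ 1
  · simp only [h1, if_pos]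
    refine loop_exit _ _ _ ?_
    simp only [pow_zero]
    omega
  · simp only [h1, if_neg, not_false_iff]
    obtain ⟨hb1, hb2, _⟩ := bitLength_brackets num (by omega)
    have h0 : getRoomnumLoop (num - 2 ^ 0 + 1) 0 ((0 : Nat) : Int) =
        (PySem.Int.bitLength num - 1, ((PySem.Int.bitLength num - 1 : Nat) : Int)) :=
      loop_reach num (PySem.Int.bitLength num - 1) hb1 hb2 (PySem.Int.bitLength num - 1) 0
        (by omega)
    simpa using h0

-- every character Nat.toDigits (= str(n), n ≥ 0) produces comes from Nat.digitChar
theorem mem_toDigitsCore (fuel : Nat) :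
    ∀ (n : Nat) (ds : List Char) (c : Char), c ∈ Nat.toDigitsCore 10 fuel n ds →
      c ∈ ds ∨ ∃ k, c = Nat.digitChar k := by
  induction fuel with
  | zero => intro n ds c hc; exact Or.inl hc
  | succ fuel ih =>
    intro n ds c hc
    rw [Nat.toDigitsCore] at hc
    by_cases hz : n / 10 = 0
    · simp only [hz, if_pos] at hc
      rcases List.mem_cons.mp hc with hm | hm
      · exact Or.inr ⟨n % 10, hm⟩
      · exact Or.inl hm
    · simp only [hz, if_neg, not_false_iff] at hc
      rcases ih (n / 10) ((n % 10).digitChar :: ds) c hc with hm | hm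
      · rcases List.mem_cons.mp hm with hm2 | hm2
        · exact Or.inr ⟨n % 10, hm2⟩
        · exact Or.inl hm2
      · exact Or.inr hm

theorem digitChar_ne_sign (k : Nat) : Nat.digitChar k ≠ '+' ∧ Nat.digitChar k ≠ '-' := by
  rcases k with _|_|_|_|_|_|_|_|_|_|_|_|_|_|_|_|k <;> simp [Nat.digitChar]

-- for n ≥ 0, str(n).zfill(18) = str(n).rjust(18, '0') (no sign character in front)
theorem zfill_eq_rjust (n : Int) (h : 0 ≤ n) :
    PySem.Chars.zfill (PySem.Int.toChars n) 18 = pyRjust0 (PySem.Int.toChars n) 18 := by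
  have hnn : ¬ n < 0 := by omega
  have htc : PySem.Int.toChars n = Nat.toDigits 10 n.toNat := by
    simp [PySem.Int.toChars, hnn]
  have hhead : ∀ c ∈ PySem.Int.toChars n, c ≠ '+' ∧ c ≠ '-' := by
    intro c hc
    rw [htc] at hc
    rcases mem_toDigitsCore _ _ _ _ hc with hm | ⟨k, hk⟩
    · simp at hm
    · rw [hk]; exact digitChar_ne_sign k
  unfold PySem.Chars.zfill pyRjust0
  by_cases hlen : (18:Int) ≤ (PySem.Int.toChars n).length
  · simp only [hlen, if_pos]
    have h0 : 18 - (PySem.Int.toChars n).length = 0 := by omega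
    rw [h0]
    simp
  · simp only [hlen, if_neg, not_false_iff]
    cases hcs : PySem.Int.toChars n with
    | nil => simp
    | cons c rest =>
      have hc := hhead c (by rw [hcs]; exact List.mem_cons_self)
      have hsign : ¬ (c = '+' ∨ c = '-') := by
        rintro (h2 | h2)
        · exact hc.1 h2
        · exact hc.2 h2
      simp only [hsign, if_neg, not_false_iff]
      rfl

-- ===== VERDICT (by name: the statement is the Claim_ definition above) =====
theorem get_roomnum_spec : Claim_equal_get_roomnum := by
  intro num _ hpre
  have hp : (0:Int) ≤ num := hpre
  unfold Spec_get_roomnum get_roomnum get_roomnum_alt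
  rw [loop_closed_form num hp]
  set e : Nat := if num ≤ 1 then 0 else PySem.Int.bitLength num - 1 with he
  have hlastnn : 0 ≤ num - 2 ^ e + 1 := by
    by_cases h1 : num ≤ 1
    · have he0 : e = 0 := by simp [he, h1]
      rw [he0]
      simp
      omega
    · have he1 : e = PySem.Int.bitLength num - 1 := by simp [he, h1]
      obtain ⟨hb1, _, _⟩ := bitLength_brackets num (by omega)
      rw [he1]
      omega
  by_cases hl : (PySem.Int.toChars (num - 2 ^ e + 1)).length < 18
  · simp only [hl, if_pos, zfill_eq_rjust _ hlastnn]
  · simp only [hl, if_neg, not_false_iff]
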